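-- pv_equiv track=rewrite | github.com/movses/codequality-test | 1.py | compute_value_a
-- ===== SOURCE A (Python) =====
-- def compute_value_a(x):
--     # messy, duplicated logic
--     if x is None:
--         return 0
--     if x == 0:
--         return 0
--     total = 0
--     for i in range(abs(x)):
--         total += i
--         total += 0  # duplicate
--     return total
-- ===== SOURCE B (Python) =====
-- def compute_value_a(x):
--     if x is None:
--         return 0
--     n = abs(x)
--     return n * (n - 1) // 2
-- ===== Notes on version B (the rewrite author's own statement) =====
-- stated objective: faster
-- what changed: Replaces the O(|x|) summation loop with the closed-form arithmetic-series formula n*(n-1)//2.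
import Mathlib
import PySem

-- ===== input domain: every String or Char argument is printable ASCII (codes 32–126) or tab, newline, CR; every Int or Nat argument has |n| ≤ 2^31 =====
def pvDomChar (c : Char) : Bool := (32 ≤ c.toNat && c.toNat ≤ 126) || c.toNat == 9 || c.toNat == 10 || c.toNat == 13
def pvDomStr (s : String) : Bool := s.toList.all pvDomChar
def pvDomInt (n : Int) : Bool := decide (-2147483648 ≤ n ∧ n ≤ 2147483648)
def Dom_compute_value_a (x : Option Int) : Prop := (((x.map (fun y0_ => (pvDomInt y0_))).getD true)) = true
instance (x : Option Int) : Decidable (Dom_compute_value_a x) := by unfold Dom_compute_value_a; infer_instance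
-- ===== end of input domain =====

-- B replaces A's O(|x|) summation loop with the closed-form formula n*(n-1)//2 (objective: faster).

-- ===== PORT A =====
def compute_value_a (x : Option Int) : Int :=
  match x with
  | none => 0
  | some v =>
    if v = 0 then 0
    else (PySem.List.pyRange 0 (|v|) 1).foldl (fun total i => total + i + 0) 0

-- ===== PORT B =====
def compute_value_a_alt (x : Option Int) : Int :=
  match x with
  | none => 0
  | some v =>
    let n := |v|
    PySem.Int.floordiv (n * (n - 1)) 2

-- ===== PRECONDITION & SPEC =====
def Spec_compute_value_a (x : Option Int) (out : Int) : Prop := out = compute_value_a_alt x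
instance (x : Option Int) (out : Int) : Decidable (Spec_compute_value_a x out) := by unfold Spec_compute_value_a; infer_instance

-- ===== CLAIM (what is proved, stated in full; the proofs are below) =====
def Claim_equal_compute_value_a : Prop := ∀ (x : Option Int), Dom_compute_value_a x → Spec_compute_value_a x (compute_value_a x)

-- ===== LEMMAS AND PROOFS =====

-- sum of 0..n-1 via the loop equals n*(n-1)/2
theorem pv_sum_range (n : Nat) :
    (PySem.List.pyRange 0 (n : Int) 1).foldl (fun total i => total + i + 0) 0
      = PySem.Int.floordiv ((n : Int) * ((n : Int) - 1)) 2 := by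
  have key : ∀ (m : Nat) (init : Int),
      (PySem.List.pyRange 0 (m : Int) 1).foldl (fun total i => total + i + 0) init
        = init + PySem.Int.floordiv ((m : Int) * ((m : Int) - 1)) 2 := by
    intro m
    induction m with
    | zero =>
      intro init
      simp [PySem.Int.floordiv]
    | succ k ih =>
      intro init
      have h : (0 : Int) ≤ (k : Int) := by positivity
      have : ((k + 1 : Nat) : Int) = (k : Int) + 1 := by push_cast; ring
      rw [this, PySem.List.pyRange_one_succ_right h, List.foldl_append, ih]
      simp only [List.foldl]
      have e2 : PySem.Int.floordiv (((k : Int) + 1) * ((k : Int) + 1 - 1)) 2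
          = PySem.Int.floordiv ((k : Int) * ((k : Int) - 1)) 2 + k := by
        rw [PySem.Int.floordiv_eq_ediv_of_pos (by norm_num),
            PySem.Int.floordiv_eq_ediv_of_pos (by norm_num)]
        have h1 : ((k : Int) + 1) * ((k : Int) + 1 - 1) = (k : Int) * ((k : Int) - 1) + 2 * k := by ring
        rw [h1]
        omega
      rw [e2]; ring
  have := key n 0
  rw [this]; ring

-- ===== VERDICT (by name: the statement is the Claim_ definition above) =====
theorem compute_value_a_spec : Claim_equal_compute_value_a := by
  intro x _
  unfold Spec_compute_value_a compute_value_a compute_value_a_alt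
  match x with
  | none => rfl
  | some v =>
    simp only []
    split_ifs with hv
    · subst hv; decide
    · obtain ⟨n, hn⟩ : ∃ n : Nat, |v| = (n : Int) :=
        ⟨(|v|).toNat, (Int.toNat_of_nonneg (abs_nonneg v)).symm⟩
      rw [hn, pv_sum_range]
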